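-- pv_equiv track=rewrite | github.com/GoatEngine/discord-python-bot | emojiList.py | counter69
-- ===== SOURCE A (Python) =====
-- def counter69(count):
--     what = 'II'
--     huh = ''
--     eh = ''
--     for i in range(count-6):
--         what += 'I'
--         if i % 2 == 0:
--             huh += 'O'
--         if i % 3 == 0:
--             eh += 'U'
--     return "W"+ huh +"W. D"+eh+"DE. N" + what + "CE."
-- ===== SOURCE B (Python) =====
-- def counter69(count):
--     n = max(0, count - 6)
--     return "W" + "O" * ((n + 1) // 2) + "W. D" + "U" * ((n + 2) // 3) + "DE. N" + "I" * (n + 2) + "CE."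
-- ===== Notes on version B (the rewrite author's own statement) =====
-- stated objective: simpler
-- what changed: Replaces the character-appending loop with closed-form segment lengths: n=max(0,count-6) and string multiplication with (n+1)//2 'O's, (n+2)//3 'U's and n+2 'I's.
import Mathlib
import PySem

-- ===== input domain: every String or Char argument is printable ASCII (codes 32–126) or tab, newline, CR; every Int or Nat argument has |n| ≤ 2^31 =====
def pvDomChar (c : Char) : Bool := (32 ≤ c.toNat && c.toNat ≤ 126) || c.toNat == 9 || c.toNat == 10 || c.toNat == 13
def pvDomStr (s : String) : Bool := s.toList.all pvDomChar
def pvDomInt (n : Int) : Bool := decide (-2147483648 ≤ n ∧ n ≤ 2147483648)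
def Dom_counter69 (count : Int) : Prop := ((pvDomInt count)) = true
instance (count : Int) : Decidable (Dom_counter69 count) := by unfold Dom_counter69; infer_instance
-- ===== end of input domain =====

-- B replaces A's character-appending loop with closed-form segment lengths (simpler; same cost).

-- ===== PORT A =====
-- loop state: (what, huh, eh); each Python string is kept as its REVERSED list of chars
-- (cons = Python's amortized-O(1) append) and reversed once at the end — exact same values;
-- the range bound is clamped to 0 exactly as range(n) is empty for n <= 0.
def counter69 (count : Int) : String :=
  let r := (PySem.List.pyRange 0 (max 0 (count - 6)) 1).foldl
    (fun (s : List Char × List Char × List Char) i =>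
      ('I' :: s.1,
       if PySem.Int.mod i 2 = 0 then 'O' :: s.2.1 else s.2.1,
       if PySem.Int.mod i 3 = 0 then 'U' :: s.2.2 else s.2.2))
    (['I', 'I'], [], [])
  String.ofList (['W'] ++ r.2.1.reverse ++ ['W', '.', ' ', 'D'] ++ r.2.2.reverse
    ++ ['D', 'E', '.', ' ', 'N'] ++ r.1.reverse ++ ['C', 'E', '.'])

-- ===== PORT B =====
def counter69_alt (count : Int) : String :=
  let n := max 0 (count - 6)
  String.ofList (['W'] ++ List.replicate (PySem.Int.floordiv (n + 1) 2).toNat 'O'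
    ++ ['W', '.', ' ', 'D'] ++ List.replicate (PySem.Int.floordiv (n + 2) 3).toNat 'U'
    ++ ['D', 'E', '.', ' ', 'N'] ++ List.replicate (n + 2).toNat 'I' ++ ['C', 'E', '.'])

-- ===== PRECONDITION & SPEC =====
def Spec_counter69 (count : Int) (out : String) : Prop := out = counter69_alt count
instance (count : Int) (out : String) : Decidable (Spec_counter69 count out) := by unfold Spec_counter69; infer_instance

-- ===== CLAIM (what is proved, stated in full; the proofs are below) =====
def Claim_equal_counter69 : Prop := ∀ (count : Int), Dom_counter69 count → Spec_counter69 count (counter69 count)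

-- ===== LEMMAS AND PROOFS =====

lemma replicate_cons_one (a b : Nat) (c : Char) (h : b = a + 1) :
    c :: List.replicate a c = List.replicate b c := by
  subst h; rfl

lemma counter69_loop (N : Nat) :
    (PySem.List.pyRange 0 (N : Int) 1).foldl
      (fun (s : List Char × List Char × List Char) i =>
        ('I' :: s.1,
         if PySem.Int.mod i 2 = 0 then 'O' :: s.2.1 else s.2.1,
         if PySem.Int.mod i 3 = 0 then 'U' :: s.2.2 else s.2.2))
      (['I', 'I'], [], [])
    = (List.replicate (N + 2) 'I', List.replicate ((N + 1) / 2) 'O',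
       List.replicate ((N + 2) / 3) 'U') := by
  induction N with
  | zero => decide
  | succ n ih =>
    have hcast : ((n + 1 : Nat) : Int) = (n : Int) + 1 := by push_cast; ring
    rw [hcast, PySem.List.pyRange_one_succ_right (by exact_mod_cast Nat.zero_le n),
      List.foldl_append, ih]
    simp only [List.foldl_cons, List.foldl_nil]
    have h2 : PySem.Int.mod (n : Int) 2 = (n : Int) % 2 :=
      PySem.Int.mod_eq_emod_of_pos (by norm_num)
    have h3 : PySem.Int.mod (n : Int) 3 = (n : Int) % 3 :=
      PySem.Int.mod_eq_emod_of_pos (by norm_num)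
    refine Prod.ext ?_ (Prod.ext ?_ ?_) <;> simp only [h2, h3]
    · exact replicate_cons_one _ _ _ rfl
    · by_cases h : (n : Int) % 2 = 0
      · rw [if_pos h]
        refine replicate_cons_one _ _ _ ?_
        omega
      · rw [if_neg h]
        congr 1
        omega
    · by_cases h : (n : Int) % 3 = 0
      · rw [if_pos h]
        refine replicate_cons_one _ _ _ ?_
        omega
      · rw [if_neg h]
        congr 1
        omega

lemma floordiv2 (N : Nat) : (PySem.Int.floordiv ((N : Int) + 1) 2).toNat = (N + 1) / 2 := by
  have h := PySem.Int.floordiv_mul_add_mod ((N : Int) + 1) 2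
  have h1 := PySem.Int.mod_nonneg ((N : Int) + 1) (b := 2) (by norm_num)
  have h2 := PySem.Int.mod_lt ((N : Int) + 1) (b := 2) (by norm_num)
  omega

lemma floordiv3 (N : Nat) : (PySem.Int.floordiv ((N : Int) + 2) 3).toNat = (N + 2) / 3 := by
  have h := PySem.Int.floordiv_mul_add_mod ((N : Int) + 2) 3
  have h1 := PySem.Int.mod_nonneg ((N : Int) + 2) (b := 3) (by norm_num)
  have h2 := PySem.Int.mod_lt ((N : Int) + 2) (b := 3) (by norm_num)
  omega

lemma toNat_add_two (N : Nat) : ((N : Int) + 2).toNat = N + 2 := by omega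

-- ===== VERDICT (by name: the statement is the Claim_ definition above) =====
theorem counter69_spec : Claim_equal_counter69 := by
  intro count _
  unfold Spec_counter69 counter69 counter69_alt
  have hmax : max 0 (count - 6) = (((count - 6).toNat : Nat) : Int) := by omega
  rw [hmax, counter69_loop]
  simp only [floordiv2, floordiv3, toNat_add_two, List.reverse_replicate]
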